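-- pv_equiv track=rewrite | github.com/artistgrowth/bandsintao | bandsintao/client.py | _clean_slug
-- ===== SOURCE A (Python) =====
-- def _clean_slug(val):
--     if val and isinstance(val, str):
--         for find, replace in [
--             ("/", "%252F"),
--             ("?", "%253F"),
--             ("*", "%252A"),
--             ("\"", "%27C"),
--         ]:
--             val = val.replace(find, replace)
--     return val
-- ===== SOURCE B (Python) =====
-- def _clean_slug(val):
--     if not val or not isinstance(val, str):
--         return val
--     pieces = []
--     for c in val:
--         if c == "/":
--             pieces.append("%252F")
--         elif c == "?":
--             pieces.append("%253F")
--         elif c == "*":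
--             pieces.append("%252A")
--         elif c == "\"":
--             pieces.append("%27C")
--         else:
--             pieces.append(c)
--     return "".join(pieces)
-- ===== Notes on version B (the rewrite author's own statement) =====
-- stated objective: alternative
-- what changed: Replaces four sequential full-string .replace passes by one explicit character loop with an if/elif chain that appends each character's encoding (or the character) to a list joined once at the end; valid because no replacement string contains any of the four source characters, so the staged passes never interact.
import Mathlib
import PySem

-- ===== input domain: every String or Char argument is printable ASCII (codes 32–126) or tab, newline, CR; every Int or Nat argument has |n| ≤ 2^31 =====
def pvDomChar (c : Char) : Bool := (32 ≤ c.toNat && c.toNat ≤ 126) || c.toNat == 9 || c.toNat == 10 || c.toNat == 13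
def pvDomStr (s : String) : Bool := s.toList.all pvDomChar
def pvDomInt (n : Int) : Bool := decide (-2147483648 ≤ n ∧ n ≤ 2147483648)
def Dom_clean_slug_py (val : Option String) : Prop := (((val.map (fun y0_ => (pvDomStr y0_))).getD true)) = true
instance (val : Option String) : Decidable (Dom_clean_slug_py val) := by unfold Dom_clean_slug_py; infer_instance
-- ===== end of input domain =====

-- B: one explicit character loop with an if/elif chain appending pieces joined once, instead of A's four staged full-string replace passes.
-- ===== PORT A =====
def pairs_clean_slug : List (String × String) :=
  [("/", "%252F"), ("?", "%253F"), ("*", "%252A"), ("\"", "%27C")]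

def clean_slug_py (val : Option String) : Option String :=
  match val with
  | none => none
  | some s =>
      if s ≠ "" then
        some (pairs_clean_slug.foldl (fun v p => PySem.Str.replace v p.1 p.2) s)
      else some s

-- ===== PORT B =====
-- the for-loop of Source B as structural recursion over the characters, carrying the `pieces` list
def clean_slug_go : List Char → List String → List String
  | [], pieces => pieces
  | c :: t, pieces =>
      clean_slug_go t (pieces ++
        [if c = '/' then "%252F"
         else if c = '?' then "%253F"
         else if c = '*' then "%252A"
         else if c = '"' then "%27C"
         else String.singleton c])

def clean_slug_py_alt (val : Option String) : Option String :=
  match val with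
  | none => none
  | some s =>
      if s = "" then some s
      else some (PySem.Str.join "" (clean_slug_go s.toList []))

-- ===== PRECONDITION & SPEC =====
def Spec_clean_slug_py (val : Option String) (out : Option String) : Prop := out = clean_slug_py_alt val
instance (val : Option String) (out : Option String) : Decidable (Spec_clean_slug_py val out) := by unfold Spec_clean_slug_py; infer_instance

-- ===== CLAIM (what is proved, stated in full; the proofs are below) =====
def Claim_equal_clean_slug_py : Prop := ∀ (val : Option String), Dom_clean_slug_py val → Spec_clean_slug_py val (clean_slug_py val)

-- ===== LEMMAS AND PROOFS =====

-- replace with a single-character pattern is a per-character flatMap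
theorem replace_go_single (o : Char) (new : List Char) :
    ∀ (l acc : List Char),
      PySem.Chars.replace.go [o] new l.length l acc
        = acc.reverse ++ l.flatMap (fun c => if c = o then new else [c]) := by
  intro l
  induction l with
  | nil => intro acc; simp [PySem.Chars.replace.go]
  | cons c t ih =>
      intro acc
      simp only [List.length_cons, PySem.Chars.replace.go, List.isPrefixOf]
      by_cases h : c = o
      · subst h
        simp [ih, List.flatMap_cons]
      · have hne : (o == c) = false := by simp; exact fun e => h e.symm
        simp [hne, ih, List.flatMap_cons, h]

theorem replace_single (s : List Char) (o : Char) (new : List Char) :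
    PySem.Chars.replace s [o] new = s.flatMap (fun c => if c = o then new else [c]) := by
  simp [PySem.Chars.replace, replace_go_single]

-- the common per-character translation both sides compute
def gTrans (c : Char) : List Char :=
  if c = '/' then "%252F".toList
  else if c = '?' then "%253F".toList
  else if c = '*' then "%252A".toList
  else if c = '"' then "%27C".toList
  else [c]

theorem join_nil_flatten (L : List (List Char)) :
    PySem.Chars.join [] L = L.flatten := by
  induction L with
  | nil => simp [PySem.Chars.join_nil]
  | cons p rest ih =>
      cases rest with
      | nil => simp [PySem.Chars.join_singleton]
      | cons q r => simp [PySem.Chars.join_cons_cons, ih]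

theorem chainA (cs : List Char) :
    PySem.Chars.replace (PySem.Chars.replace (PySem.Chars.replace
      (PySem.Chars.replace cs "/".toList "%252F".toList) "?".toList "%253F".toList)
      "*".toList "%252A".toList) "\"".toList "%27C".toList
    = cs.flatMap gTrans := by
  have h1 : "/".toList = ['/'] := rfl
  have h2 : "?".toList = ['?'] := rfl
  have h3 : "*".toList = ['*'] := rfl
  have h4 : "\"".toList = ['"'] := rfl
  rw [h1, h2, h3, h4, replace_single, replace_single, replace_single, replace_single]
  induction cs with
  | nil => simp
  | cons c t ih =>
      simp only [List.flatMap_cons, List.flatMap_append, ih]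
      congr 1
      by_cases e1 : c = '/'
      · subst e1; decide
      by_cases e2 : c = '?'
      · subst e2; decide
      by_cases e3 : c = '*'
      · subst e3; decide
      by_cases e4 : c = '"'
      · subst e4; decide
      simp [gTrans, e1, e2, e3, e4]

-- the if/elif chain's piece, as a function (proof-side name only)
def gPiece (c : Char) : String :=
  if c = '/' then "%252F"
  else if c = '?' then "%253F"
  else if c = '*' then "%252A"
  else if c = '"' then "%27C"
  else String.singleton c

theorem gPiece_toList (c : Char) : (gPiece c).toList = gTrans c := by
  unfold gPiece gTrans
  split_ifs <;> simp [String.singleton]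

theorem clean_slug_go_spec (l : List Char) :
    ∀ pieces, clean_slug_go l pieces = pieces ++ l.map gPiece := by
  induction l with
  | nil => intro pieces; simp [clean_slug_go]
  | cons c t ih =>
      intro pieces
      rw [clean_slug_go, ih]
      simp [gPiece]

theorem chainB (cs : List Char) :
    (PySem.Str.join "" (clean_slug_go cs [])).toList = cs.flatMap gTrans := by
  rw [clean_slug_go_spec, List.nil_append, PySem.Str.toList_join]
  have he : ("" : String).toList = ([] : List Char) := rfl
  rw [he, join_nil_flatten, List.map_map]
  have : (String.toList ∘ gPiece) = gTrans := by
    funext c; exact gPiece_toList c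
  rw [this, List.flatMap]

-- ===== VERDICT (by name: the statement is the Claim_ definition above) =====
theorem clean_slug_py_spec : Claim_equal_clean_slug_py := by
  intro val _
  unfold Spec_clean_slug_py clean_slug_py clean_slug_py_alt
  cases val with
  | none => rfl
  | some s =>
      dsimp only
      by_cases hs : s = ""
      · rw [if_pos hs, if_neg (by simp [hs])]
      · rw [if_neg hs, if_pos (by simpa using hs)]
        apply congrArg
        simp only [pairs_clean_slug, List.foldl_cons, List.foldl_nil]
        apply String.toList_inj.mp
        rw [chainB]
        simp only [PySem.Str.toList_replace]
        exact chainA s.toList
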